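-- pv_equiv track=rewrite | github.com/samvatsan/6.101 | recipes/lab.py | combined_flat_recipes
-- ===== SOURCE A (Python) =====
-- def add_flat_recipes(flat_recipes):
--     """
--     Given a list of flat_recipe dictionaries that map food items to quantities,
--     return a new overall 'grocery list' dictionary that maps each ingredient name
--     to the sum of its quantities across the given flat recipes.
--
--     For example,
--         add_flat_recipes([{'milk':1, 'chocolate':1}, {'sugar':1, 'milk':2}])
--     should return:
--         {'milk':3, 'chocolate': 1, 'sugar': 1}
--     """
--     grocery_list = {}
--     for recipe in flat_recipes: # iterate through list
--         for ingredient,amount in recipe.items(): # iterate through dictionary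
--             if ingredient not in grocery_list:
--                 grocery_list[ingredient] = amount
--             else: # if ingredient exists
--                 grocery_list[ingredient] += amount
--     return grocery_list
--
-- def combined_flat_recipes(flat_recipes):
--     """
--     Given a list of lists of dictionaries, where each inner list represents all
--     the flat recipes for a certain ingredient, compute and return a list of flat
--     recipe dictionaries that represent all the possible combinations of
--     ingredient recipes.
--     """
--     # base case: combined only has 0 or 1 things
--     if not flat_recipes:
--         return []
--
--     if len(flat_recipes) == 1: # [[{}]]
--         return flat_recipes[0] # [{}]
--
--     # recursive case: [[{},{},{}],[{},{}]]
--     # if length n, we combine 1st and rest from n (1 and n-1)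
--     first_ingredient = flat_recipes[0]
--     rest_ingredients = flat_recipes[1:] # a list of lists
--     result = []
--     # break down to atomic case
--     for first_recipe in combined_flat_recipes([first_ingredient]):
--          # combined outputs a list of recipe dictionaries
--         for second_recipe in combined_flat_recipes(rest_ingredients):
--             result.append(add_flat_recipes([first_recipe,second_recipe])) # [{}]
--     return result
-- ===== SOURCE B (Python) =====
-- def _merge(r1, r2):
--     out = {}
--     for recipe in (r1, r2):
--         for k, v in recipe.items():
--             out[k] = out.get(k, 0) + v
--     return out
--
-- def combined_flat_recipes(flat_recipes):
--     acc = None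
--     for options in reversed(flat_recipes):
--         if acc is None:
--             acc = options
--         else:
--             acc = [_merge(a, b) for a in options for b in acc]
--     return [] if acc is None else acc
-- ===== Notes on version B (the rewrite author's own statement) =====
-- stated objective: alternative
-- what changed: A's recursion recomputes the product of the remaining ingredient lists once per recipe of the first list; B is an iterative right-to-left fold that computes each sub-product exactly once and merges two dicts with a single get-based accumulation loop (the exponential output size still dominates, so wall-clock gains are modest).
import Mathlib
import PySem

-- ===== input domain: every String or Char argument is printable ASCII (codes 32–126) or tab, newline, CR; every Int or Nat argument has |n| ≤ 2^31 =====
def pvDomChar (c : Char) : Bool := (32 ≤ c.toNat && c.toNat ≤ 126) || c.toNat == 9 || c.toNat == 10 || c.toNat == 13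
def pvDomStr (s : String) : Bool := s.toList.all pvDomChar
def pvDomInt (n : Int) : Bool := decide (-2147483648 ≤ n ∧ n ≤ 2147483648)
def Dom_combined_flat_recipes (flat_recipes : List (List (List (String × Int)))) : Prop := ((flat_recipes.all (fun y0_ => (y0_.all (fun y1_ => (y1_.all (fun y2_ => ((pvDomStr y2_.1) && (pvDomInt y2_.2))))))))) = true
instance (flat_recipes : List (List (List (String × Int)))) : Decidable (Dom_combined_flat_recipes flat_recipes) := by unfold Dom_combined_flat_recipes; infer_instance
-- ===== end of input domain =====

-- B replaces A's recursion (which recomputes the rest-product for every recipe of the first list)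
-- by an iterative right-to-left fold that computes each sub-product once; objective: alternative.

-- ===== PORT A =====
-- A's add_flat_recipes inner loop body: if-not-in insert, else '+=' (read existing value, write back)
def pvStepA (g : PySem.Dict String Int) (kv : String × Int) : PySem.Dict String Int :=
  if g.contains kv.1 = false then g.insert kv.1 kv.2 else g.insert kv.1 (g.getD kv.1 0 + kv.2)

def add_flat_recipes (flat_recipes : List (List (String × Int))) : PySem.Dict String Int :=
  flat_recipes.foldl (fun g recipe => recipe.foldl pvStepA g) PySem.Dict.empty

def combined_flat_recipes (flat_recipes : List (List (List (String × Int)))) : List (List (String × Int)) :=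
  match flat_recipes with
  | [] => []
  | [x] => x
  | first :: rest@(_ :: _) =>
    (combined_flat_recipes [first]).foldl (fun result r1 =>
      (combined_flat_recipes rest).foldl (fun result r2 =>
        result ++ [(add_flat_recipes [r1, r2]).items]) result) []
termination_by flat_recipes.length
decreasing_by all_goals (subst_vars; simp)

-- ===== PORT B =====
-- Source B's _merge inner loop body: out[k] = out.get(k, 0) + v
def pvStepB (g : PySem.Dict String Int) (kv : String × Int) : PySem.Dict String Int :=
  g.insert kv.1 (g.getD kv.1 0 + kv.2)

def pvMerge (r1 r2 : List (String × Int)) : PySem.Dict String Int :=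
  [r1, r2].foldl (fun g recipe => recipe.foldl pvStepB g) PySem.Dict.empty

-- Source B's loop body: first iteration seeds acc, later ones take the product
def pvCombStep (acc : Option (List (List (String × Int)))) (options : List (List (String × Int))) :
    Option (List (List (String × Int))) :=
  match acc with
  | none => some options
  | some l => some (options.flatMap fun a => l.map fun b => (pvMerge a b).items)

def combined_flat_recipes_alt (flat_recipes : List (List (List (String × Int)))) : List (List (String × Int)) :=
  (flat_recipes.reverse.foldl pvCombStep none).getD []

-- ===== PRECONDITION & SPEC =====
def Spec_combined_flat_recipes (flat_recipes : List (List (List (String × Int)))) (out : List (List (String × Int))) : Prop := out = combined_flat_recipes_alt flat_recipes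
instance (flat_recipes : List (List (List (String × Int)))) (out : List (List (String × Int))) : Decidable (Spec_combined_flat_recipes flat_recipes out) := by unfold Spec_combined_flat_recipes; infer_instance

-- ===== CLAIM (what is proved, stated in full; the proofs are below) =====
def Claim_equal_combined_flat_recipes : Prop := ∀ (flat_recipes : List (List (List (String × Int)))), Dom_combined_flat_recipes flat_recipes → Spec_combined_flat_recipes flat_recipes (combined_flat_recipes flat_recipes)

-- ===== LEMMAS AND PROOFS =====

lemma pvStepA_eq_pvStepB : pvStepA = pvStepB := by
  funext g kv
  unfold pvStepA pvStepB
  by_cases h : g.contains kv.1 = false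
  · rw [if_pos h, PySem.Dict.getD_of_not_contains g 0 h, Int.zero_add]
  · rw [if_neg h]

lemma add_eq_merge (r1 r2 : List (String × Int)) :
    add_flat_recipes [r1, r2] = pvMerge r1 r2 := by
  unfold add_flat_recipes pvMerge
  rw [pvStepA_eq_pvStepB]

lemma combined_singleton (x : List (List (String × Int))) : combined_flat_recipes [x] = x := by
  simp [combined_flat_recipes]

lemma combined_cons (x : List (List (String × Int))) (y : List (List (String × Int)))
    (t : List (List (List (String × Int)))) :
    combined_flat_recipes (x :: y :: t) =
      x.flatMap (fun a => (combined_flat_recipes (y :: t)).map fun b => (pvMerge a b).items) := by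
  rw [combined_flat_recipes, combined_singleton]
  simp only [PySem.List.foldl_append_singleton_eq_map, PySem.List.foldl_append_eq_flatMap,
    List.nil_append, add_eq_merge]

def pvAux (fr : List (List (List (String × Int)))) : Option (List (List (String × Int))) :=
  fr.reverse.foldl pvCombStep none

lemma pvAux_cons (x : List (List (String × Int))) (xs : List (List (List (String × Int)))) :
    pvAux (x :: xs) = pvCombStep (pvAux xs) x := by
  simp [pvAux, List.foldl_append]

lemma pvAux_eq : ∀ fr : List (List (List (String × Int))), fr ≠ [] →
    pvAux fr = some (combined_flat_recipes fr) := by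
  intro fr
  induction fr with
  | nil => intro h; exact absurd rfl h
  | cons x xs ih =>
    intro _
    cases xs with
    | nil => simp [pvAux, pvCombStep, combined_singleton]
    | cons y t =>
      rw [pvAux_cons, ih (by simp), combined_cons]
      rfl

-- ===== VERDICT (by name: the statement is the Claim_ definition above) =====
theorem combined_flat_recipes_spec : Claim_equal_combined_flat_recipes := by
  intro fr _
  unfold Spec_combined_flat_recipes
  cases fr with
  | nil => simp [combined_flat_recipes, combined_flat_recipes_alt]
  | cons x xs =>
    show combined_flat_recipes (x :: xs) = combined_flat_recipes_alt (x :: xs)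
    rw [combined_flat_recipes_alt]
    have h := pvAux_eq (x :: xs) (by simp)
    rw [pvAux] at h
    rw [h, Option.getD_some]
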